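-- pv_equiv track=rewrite | github.com/natdai8/CDI-FIB | fib-cdi/decompressor_old.py | source_fromtext
-- ===== SOURCE A (Python) =====
-- def source_fromtext(txt, n=1):
--     freq_packs = {}
--     for i in range(len(txt) - n + 1):
--         packs = txt[i:i+n]
--         if packs in freq_packs:
--             freq_packs[packs] += 1
--         else:
--             freq_packs[packs] = 1
--     if (len(txt)%n != 0):
--         ini = len(txt)-len(txt)%n
--         freq_packs[txt[ini:len(txt)]] = 1
--
--     freq_list = [(k, v) for k, v in freq_packs.items()]
--     return sorted(freq_list, key=lambda x: x[0])
-- ===== SOURCE B (Python) =====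
-- def source_fromtext(txt, n=1):
--     # sort-then-group: collect all overlapping n-grams (plus the trailing
--     # short chunk), sort them, and run-length-encode the sorted list.
--     parts = [txt[i:i+n] for i in range(len(txt) - n + 1)]
--     if len(txt) % n != 0:
--         parts.append(txt[len(txt) - len(txt) % n:])
--     parts.sort()
--     rev = []
--     for p in parts:
--         if rev and rev[0][0] == p:
--             rev[0] = (p, rev[0][1] + 1)
--         else:
--             rev.insert(0, (p, 1))
--     return rev[::-1]
-- ===== Notes on version B (the rewrite author's own statement) =====
-- stated objective: alternative
-- what changed: Replaces the hash-count-then-sort-items pipeline (dict of frequencies, then sorted(items)) by sort-then-group: build the list of n-gram slices, sort it, and run-length-encode adjacent equal slices in one pass, which yields the result already in key order.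
-- outside the precondition, e.g. on source_fromtext('abc', 0): A raises ZeroDivisionError, B raises ZeroDivisionError; on source_fromtext('abc', -2): A returns [('', 1), ('a', 1), ('b', 1)], B returns [('', 5), ('a', 1), ('b', 1)]
import Mathlib
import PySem

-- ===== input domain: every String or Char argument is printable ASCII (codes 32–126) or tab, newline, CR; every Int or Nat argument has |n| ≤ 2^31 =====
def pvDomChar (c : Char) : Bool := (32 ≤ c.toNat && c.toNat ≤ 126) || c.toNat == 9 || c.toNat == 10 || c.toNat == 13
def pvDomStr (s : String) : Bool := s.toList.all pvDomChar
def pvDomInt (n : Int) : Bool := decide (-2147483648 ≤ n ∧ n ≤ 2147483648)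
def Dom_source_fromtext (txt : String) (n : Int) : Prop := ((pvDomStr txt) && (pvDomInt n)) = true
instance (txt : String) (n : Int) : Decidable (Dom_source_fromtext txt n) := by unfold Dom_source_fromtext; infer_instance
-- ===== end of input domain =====

-- B replaces A's hash-count-then-sort-items pipeline by sort-then-group (sort the n-gram
-- slices, then run-length-encode the sorted list): an alternative algorithm of similar cost.


-- ===== PORT A =====
def source_fromtext (txt : String) (n : Int) : List (String × Int) :=
  let L : Int := PySem.Str.len txt
  let freq := (PySem.List.pyRange 0 (L - n + 1) 1).foldl
    (fun d i =>
      let packs := PySem.Str.slice txt (some i) (some (i + n))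
      if d.contains packs then d.modify packs 0 (· + 1) else d.insert packs 1)
    PySem.Dict.empty
  let freq := if PySem.Int.mod L n ≠ 0 then
      let ini := L - PySem.Int.mod L n
      freq.insert (PySem.Str.slice txt (some ini) (some L)) 1
    else freq
  PySem.List.sorted (freq.items.map (fun kv => (kv.1, kv.2))) (fun x => x.1)

-- ===== PORT B =====
def source_fromtext_alt (txt : String) (n : Int) : List (String × Int) :=
  let L : Int := PySem.Str.len txt
  let parts := (PySem.List.pyRange 0 (L - n + 1) 1).map
      (fun i => PySem.Str.slice txt (some i) (some (i + n)))
  let parts := if PySem.Int.mod L n ≠ 0 then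
      parts ++ [PySem.Str.slice txt (some (L - PySem.Int.mod L n)) none]
    else parts
  let parts := PySem.List.sorted parts (fun s => s)
  (parts.foldl
    (fun rev p =>
      match rev with
      | (k, c) :: t => if k = p then (p, c + 1) :: t else (p, 1) :: (k, c) :: t
      | [] => [(p, 1)])
    []).reverse

-- ===== PRECONDITION & SPEC =====
-- Pre_ restricts n to the natural domain of a chunk size: for n = 0 the Python A raises
-- ZeroDivisionError at the modulo, and for n < 0 A's negative-length slicing plus its final
-- overwrite of the tail key with count 1 produce accidental values outside the function's purpose.
def Pre_source_fromtext (txt : String) (n : Int) : Prop := 1 ≤ n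
instance (txt : String) (n : Int) : Decidable (Pre_source_fromtext txt n) := by unfold Pre_source_fromtext; infer_instance
def pvWitness_source_fromtext : String × Int := ("abcabcab", 3)
def Spec_source_fromtext (txt : String) (n : Int) (out : List (String × Int)) : Prop := out = source_fromtext_alt txt n
instance (txt : String) (n : Int) (out : List (String × Int)) : Decidable (Spec_source_fromtext txt n out) := by unfold Spec_source_fromtext; infer_instance

-- ===== CLAIM (what is proved, stated in full; the proofs are below) =====
def Claim_equal_source_fromtext : Prop := ∀ (txt : String) (n : Int), Dom_source_fromtext txt n → Pre_source_fromtext txt n → Spec_source_fromtext txt n (source_fromtext txt n)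

-- ===== LEMMAS AND PROOFS =====

-- merge a run (k, c) into the front of a run list
def mergeHead (k : String) (c : Int) : List (String × Int) → List (String × Int)
  | [] => [(k, c)]
  | (k', c') :: t => if k' = k then (k, c + c') :: t else (k, c) :: (k', c') :: t

-- run-length encoding, structurally
def runs : List String → List (String × Int)
  | [] => []
  | p :: rest => mergeHead p 1 (runs rest)

lemma mergeHead_same (p : String) (c c' : Int) (rs : List (String × Int)) :
    mergeHead p c (mergeHead p c' rs) = mergeHead p (c + c') rs := by
  cases rs with
  | nil => simp [mergeHead]
  | cons h t =>
    obtain ⟨k', v'⟩ := h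
    by_cases hk : k' = p <;> simp [mergeHead, hk, add_assoc]

lemma mergeHead_ne (k p : String) (c c' : Int) (rs : List (String × Int)) (h : k ≠ p) :
    mergeHead k c (mergeHead p c' rs) = (k, c) :: mergeHead p c' rs := by
  have h' : ¬ p = k := fun hh => h hh.symm
  cases rs with
  | nil => simp [mergeHead, h']
  | cons hd t =>
    obtain ⟨k', v'⟩ := hd
    by_cases hk : k' = p <;> simp [mergeHead, hk, h']

-- B's foldl is runs of the input
lemma foldl_step (zs : List String) : ∀ (k : String) (c : Int) (t : List (String × Int)),
    (zs.foldl
      (fun rev p =>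
        match rev with
        | (k, c) :: t => if k = p then (p, c + 1) :: t else (p, 1) :: (k, c) :: t
        | [] => [(p, 1)])
      ((k, c) :: t)) = (mergeHead k c (runs zs)).reverse ++ t := by
  induction zs with
  | nil => intro k c t; simp [mergeHead, runs]
  | cons p rest ih =>
    intro k c t
    rw [List.foldl_cons]
    by_cases hk : k = p
    · subst hk
      rw [show (match (k, c) :: t with
            | (k', c') :: t' => if k' = k then (k, c' + 1) :: t' else (k, 1) :: (k', c') :: t'
            | [] => [(k, 1)]) = (k, c + 1) :: t from by simp]
      rw [ih k (c + 1) t, runs, mergeHead_same]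
    · rw [show (match (k, c) :: t with
            | (k', c') :: t' => if k' = p then (p, c' + 1) :: t' else (p, 1) :: (k', c') :: t'
            | [] => [(p, 1)]) = (p, 1) :: (k, c) :: t from by simp [hk]]
      rw [ih p 1 ((k, c) :: t), runs, mergeHead_ne k p c 1 (runs rest) hk]
      simp

lemma foldl_eq_runs (zs : List String) :
    (zs.foldl
      (fun rev p =>
        match rev with
        | (k, c) :: t => if k = p then (p, c + 1) :: t else (p, 1) :: (k, c) :: t
        | [] => [(p, 1)])
      ([] : List (String × Int))).reverse = runs zs := by
  cases zs with
  | nil => rfl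
  | cons p rest =>
    rw [List.foldl_cons]
    rw [show (match ([] : List (String × Int)) with
          | (k', c') :: t' => if k' = p then (p, c' + 1) :: t' else (p, 1) :: (k', c') :: t'
          | [] => [(p, 1)]) = [(p, 1)] from rfl]
    rw [show ([(p, 1)] : List (String × Int)) = (p, 1) :: [] from rfl]
    rw [foldl_step rest p 1 []]
    simp [runs]

lemma mergeHead_ne_nil (k : String) (c : Int) (rs : List (String × Int)) :
    mergeHead k c rs ≠ [] := by
  cases rs with
  | nil => simp [mergeHead]
  | cons hd t =>
    obtain ⟨k', c'⟩ := hd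
    by_cases hk : k' = k <;> simp [mergeHead, hk]

lemma runs_eq_nil (zs : List String) (h : runs zs = []) : zs = [] := by
  cases zs with
  | nil => rfl
  | cons p rest => exact absurd h (mergeHead_ne_nil p 1 (runs rest))

lemma mergeHead_cons_eq (k : String) (c c' : Int) (t : List (String × Int)) :
    mergeHead k c ((k, c') :: t) = (k, c + c') :: t := by simp [mergeHead]

lemma mergeHead_cons_ne (k : String) (c : Int) (k' : String) (c' : Int)
    (t : List (String × Int)) (h : k' ≠ k) :
    mergeHead k c ((k', c') :: t) = (k, c) :: (k', c') :: t := by simp [mergeHead, h]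

-- the run-length encoding of a sorted list: strictly increasing keys, counts are counts
lemma runs_spec : ∀ (zs : List String), zs.Pairwise (· ≤ ·) →
    ((runs zs).Pairwise (fun a b => a.1 < b.1)) ∧
    (∀ (k : String) (c : Int), ((k, c) ∈ runs zs ↔ k ∈ zs ∧ c = (zs.count k : Int))) := by
  intro zs
  induction zs with
  | nil => intro _; exact ⟨by simp [runs], by simp [runs]⟩
  | cons p rest ih =>
    intro hp
    rw [List.pairwise_cons] at hp
    obtain ⟨hple, hrest⟩ := hp
    obtain ⟨ihpw, ihmem⟩ := ih hrest
    rw [runs]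
    cases hr : runs rest with
    | nil =>
      have hrn : rest = [] := runs_eq_nil rest hr
      subst hrn
      refine ⟨by simp [mergeHead], ?_⟩
      intro k c
      simp only [mergeHead, Prod.mk.injEq, List.mem_cons,
        List.not_mem_nil, or_false]
      constructor
      · rintro ⟨rfl, rfl⟩; simp
      · rintro ⟨rfl, rfl⟩; simp
    | cons hd t =>
      obtain ⟨k', c'⟩ := hd
      have hk'mem : ((k', c') : String × Int) ∈ runs rest := by rw [hr]; exact List.mem_cons_self
      obtain ⟨hk'rest, hc'⟩ := (ihmem k' c').mp hk'mem
      have hpk' : p ≤ k' := hple _ hk'rest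
      rw [hr] at ihpw
      rw [List.pairwise_cons] at ihpw
      obtain ⟨hk'lt, htpw⟩ := ihpw
      by_cases hpe : k' = p
      · obtain rfl := hpe
        rw [mergeHead_cons_eq]
        refine ⟨List.pairwise_cons.mpr ⟨hk'lt, htpw⟩, ?_⟩
        intro k c
        constructor
        · intro hm
          rcases List.mem_cons.mp hm with he | hm'
          · obtain ⟨h1, h2⟩ : k' = k ∧ (1 : Int) + c' = c :=
              ⟨congrArg Prod.fst he.symm, congrArg Prod.snd he.symm⟩
            obtain rfl := h1.symm
            obtain rfl := h2
            refine ⟨List.mem_cons_self, ?_⟩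
            simp only [List.count_cons, BEq.rfl, if_true, hc']
            push_cast
            omega
          · have hmr : ((k, c) : String × Int) ∈ runs rest := by
              rw [hr]; exact List.mem_cons_of_mem _ hm'
            obtain ⟨hkr, hck⟩ := (ihmem k c).mp hmr
            have hlt : k' < k := hk'lt (k, c) hm'
            have hne1 : ¬ (k = k') := fun h => absurd h.symm (ne_of_lt hlt)
            have hne2 : ¬ (k' = k) := ne_of_lt hlt
            refine ⟨List.mem_cons_of_mem _ hkr, ?_⟩
            simp [hne2, hck]
        · rintro ⟨hkm, rfl⟩
          by_cases hkp : k = k'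
          · obtain rfl := hkp
            have hcv : (((k :: rest).count k : Nat) : Int) = 1 + c' := by
              simp only [List.count_cons, BEq.rfl, if_true, hc']
              push_cast
              omega
            rw [hcv]
            exact List.mem_cons_self
          · have hkr : k ∈ rest := by
              rcases List.mem_cons.mp hkm with h | h
              · exact absurd h hkp
              · exact h
            have hmr : ((k, (rest.count k : Int)) : String × Int) ∈ runs rest :=
              (ihmem k _).mpr ⟨hkr, rfl⟩
            rw [hr] at hmr
            have hmt : ((k, (rest.count k : Int)) : String × Int) ∈ t := by
              rcases List.mem_cons.mp hmr with h | h
              · exact absurd (congrArg Prod.fst h) hkp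
              · exact h
            have hkp2 : ¬ (k' = k) := fun h => hkp h.symm
            have hcv : (((k' :: rest).count k : Nat) : Int) = (rest.count k : Int) := by
              simp [hkp2]
            rw [hcv]
            exact List.mem_cons_of_mem _ hmt
      · -- k' ≠ p : p is a fresh (strictly smallest) key
        have hplt : p < k' := lt_of_le_of_ne hpk' (fun h => hpe h.symm)
        have hpnotin : p ∉ rest := by
          intro hmem
          have hmr : ((p, (rest.count p : Int)) : String × Int) ∈ runs rest :=
            (ihmem p _).mpr ⟨hmem, rfl⟩
          rw [hr] at hmr
          rcases List.mem_cons.mp hmr with h | h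
          · exact hpe (congrArg Prod.fst h).symm
          · exact absurd hplt (not_lt_of_gt (hk'lt _ h))
        rw [mergeHead_cons_ne _ _ _ _ _ hpe]
        constructor
        · refine List.pairwise_cons.mpr ⟨?_, List.pairwise_cons.mpr ⟨hk'lt, htpw⟩⟩
          intro x hx
          rcases List.mem_cons.mp hx with h | h
          · rw [h]; exact hplt
          · exact lt_trans hplt (hk'lt x h)
        · intro k c
          constructor
          · intro hm
            rcases List.mem_cons.mp hm with he | hm'
            · obtain ⟨h1, h2⟩ : p = k ∧ (1 : Int) = c :=
                ⟨congrArg Prod.fst he.symm, congrArg Prod.snd he.symm⟩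
              obtain rfl := h1
              obtain rfl := h2
              refine ⟨List.mem_cons_self, ?_⟩
              have h0 : rest.count p = 0 := List.count_eq_zero.mpr hpnotin
              simp [h0]
            · have hmr : ((k, c) : String × Int) ∈ runs rest := by rw [hr]; exact hm'
              obtain ⟨hkr, hck⟩ := (ihmem k c).mp hmr
              have hkp : ¬ (k = p) := fun h => hpnotin (h ▸ hkr)
              have hkp' : ¬ (p = k) := fun h => hkp h.symm
              refine ⟨List.mem_cons_of_mem _ hkr, ?_⟩
              simp [hkp', hck]
          · rintro ⟨hkm, rfl⟩
            by_cases hkp : k = p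
            · obtain rfl := hkp
              have h0 : rest.count k = 0 := List.count_eq_zero.mpr hpnotin
              have hcv : (((k :: rest).count k : Nat) : Int) = 1 := by
                simp [h0]
              rw [hcv]
              exact List.mem_cons_self
            · have hkr : k ∈ rest := by
                rcases List.mem_cons.mp hkm with h | h
                · exact absurd h hkp
                · exact h
              have hkp2 : ¬ (p = k) := fun h => hkp h.symm
              have hcv : (((p :: rest).count k : Nat) : Int) = (rest.count k : Int) := by
                simp [hkp2]
              rw [hcv]
              have hmr : ((k, (rest.count k : Int)) : String × Int) ∈ runs rest :=
                (ihmem k _).mpr ⟨hkr, rfl⟩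
              rw [hr] at hmr
              exact List.mem_cons_of_mem _ hmr

-- a dict lookup of an absent key gives the default
lemma getD_of_contains_false (d : PySem.Dict String Int) (k : String)
    (h : d.contains k = false) : d.getD k 0 = 0 := by
  simp [PySem.Dict.getD, PySem.Dict.get?, PySem.Dict.contains] at *
  rw [List.find?_eq_none.mpr]
  · rfl
  · intro p hp hbeq
    exact h p.1 p.2 hp (by simpa using hbeq)

-- A's per-element dict update is Counter's update
lemma stepA_eq (d : PySem.Dict String Int) (x : String) :
    (if d.contains x then d.modify x 0 (· + 1) else d.insert x 1) = d.modify x 0 (· + 1) := by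
  by_cases h : d.contains x
  · rw [if_pos h]
  · rw [if_neg h, PySem.Dict.modify, getD_of_contains_false d x (by simpa using h), zero_add]

-- inserting a fresh key with count 1 extends the Counter
lemma insert_fresh_eq_counter (xs : List String) (t : String) (h : t ∉ xs) :
    (PySem.Dict.counter xs).insert t 1 = PySem.Dict.counter (xs ++ [t]) := by
  have hc : (PySem.Dict.counter xs).contains t = false := by
    rw [PySem.Dict.contains_counter]
    simp [h]
  rw [PySem.Dict.counter_append_singleton, PySem.Dict.modify,
    getD_of_contains_false _ _ hc, zero_add]

-- the central fact: sorted Counter items = run-length encoding of the sorted list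
lemma sorted_counter_items_eq_runs_sorted (ys : List String) :
    PySem.List.sorted ((PySem.Dict.counter ys).items.map (fun kv => (kv.1, kv.2))) (fun x => x.1)
      = runs (PySem.List.sorted ys (fun s => s)) := by
  have hmap : ((PySem.Dict.counter ys).items.map (fun kv => (kv.1, kv.2)))
      = (PySem.Set.ofList ys).map (fun k => (k, (ys.count k : Int))) := by
    rw [PySem.Dict.items_counter]; simp
  rw [hmap]
  have hchain : (PySem.List.sorted ys (fun s => s)).Pairwise (· ≤ ·) :=
    PySem.List.sorted_pairwise ys (fun s => s)
  obtain ⟨hpw, hmem⟩ := runs_spec _ hchain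
  apply PySem.List.sorted_eq_of_perm_of_pairwise_lt
  · rw [List.perm_ext_iff_of_nodup]
    · intro a
      obtain ⟨k, c⟩ := a
      rw [hmem k c]
      have hcount : ((PySem.List.sorted ys (fun s => s)).count k : Int) = (ys.count k : Int) := by
        rw [(PySem.List.sorted_perm ys (fun s => s) false).count_eq]
      constructor
      · rintro ⟨hk, rfl⟩
        refine List.mem_map.mpr ⟨k, ?_, ?_⟩
        · exact (PySem.Set.mem_ofList ys k).mpr ((PySem.List.mem_sorted ys _ false k).mp hk)
        · rw [hcount]
      · intro hmm
        obtain ⟨k0, hk0, heq⟩ := List.mem_map.mp hmm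
        obtain ⟨h1, h2⟩ : k0 = k ∧ ((ys.count k0 : Nat) : Int) = c :=
          ⟨congrArg Prod.fst heq, congrArg Prod.snd heq⟩
        subst h1
        refine ⟨(PySem.List.mem_sorted ys _ false k0).mpr ((PySem.Set.mem_ofList ys k0).mp hk0), ?_⟩
        rw [hcount, h2]
    · exact hpw.imp (fun {a b} h => fun he => absurd (congrArg Prod.fst he) (ne_of_lt h))
    · exact (PySem.Set.nodup_ofList ys).map
        (fun a b h => congrArg Prod.fst h)
  · exact hpw

-- ===== VERDICT (by name: the statement is the Claim_ definition above) =====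
theorem source_fromtext_spec : Claim_equal_source_fromtext := by
  intro txt n _ hpre
  have hn : (0 : Int) < n := hpre
  unfold Spec_source_fromtext source_fromtext source_fromtext_alt
  simp only []
  set L : Int := PySem.Str.len txt with hL
  have hL0 : 0 ≤ L := by rw [hL, PySem.Str.len_eq]; positivity
  set slc : Int → String := fun i => PySem.Str.slice txt (some i) (some (i + n)) with hslc
  set xs : List String := (PySem.List.pyRange 0 (L - n + 1) 1).map slc with hxs
  -- A's counting loop builds Counter xs
  have hA : (PySem.List.pyRange 0 (L - n + 1) 1).foldl
      (fun d i =>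
        let packs := PySem.Str.slice txt (some i) (some (i + n))
        if d.contains packs then d.modify packs 0 (· + 1) else d.insert packs 1)
      PySem.Dict.empty = PySem.Dict.counter xs := by
    rw [hxs, PySem.Dict.counter_eq_foldl, List.foldl_map]
    congr 1
    funext d i
    exact stepA_eq d (slc i)
  rw [hA]
  by_cases hm : PySem.Int.mod L n ≠ 0
  · rw [if_pos hm, if_pos hm]
    set m : Int := PySem.Int.mod L n with hmm
    have hm0 : 0 ≤ m := PySem.Int.mod_nonneg L hn
    have hmlt : m < n := PySem.Int.mod_lt L hn
    have hmle : m ≤ L := by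
      have hfd : 0 ≤ PySem.Int.floordiv L n := by
        rw [PySem.Int.floordiv_eq_ediv_of_pos hn]
        exact Int.ediv_nonneg hL0 (le_of_lt hn)
      have hsum := PySem.Int.floordiv_mul_add_mod L n
      have hprod : 0 ≤ PySem.Int.floordiv L n * n := mul_nonneg hfd (le_of_lt hn)
      rw [hmm]
      linarith
    have hini0 : 0 ≤ L - m := by omega
    have hlenZ : ((txt.toList.length : Nat) : Int) = L := by rw [hL, PySem.Str.len_eq]
    -- the two spellings of the trailing chunk coincide
    have htail : PySem.Str.slice txt (some (L - m)) (some L)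
        = PySem.Str.slice txt (some (L - m)) none := by
      simp only [PySem.Str.slice, PySem.Chars.slice]
      congr 1
      rw [PySem.List.slice_toNat _ hini0 hL0, PySem.List.slice_from _ hini0]
      apply List.take_of_length_le
      rw [List.length_drop]
      omega
    set t : String := PySem.Str.slice txt (some (L - m)) none with ht
    rw [htail]
    -- the trailing chunk is shorter than n, hence never an n-gram
    have hnotin : t ∉ xs := by
      intro hmem
      obtain ⟨i, hiR, hieq⟩ := List.mem_map.mp (hxs ▸ hmem)
      obtain ⟨hi0, hilt⟩ := PySem.List.mem_pyRange_one.mp hiR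
      have h1 : t.toList.length = m.toNat := by
        rw [ht]
        simp only [PySem.Str.slice, PySem.Chars.slice, String.toList_ofList]
        rw [PySem.List.slice_from _ hini0, List.length_drop]
        omega
      have h2 : (slc i).toList.length = n.toNat := by
        rw [hslc]
        simp only [PySem.Str.slice, PySem.Chars.slice, String.toList_ofList]
        rw [PySem.List.slice_toNat _ hi0 (by omega), List.length_take, List.length_drop]
        omega
      rw [hieq] at h2
      rw [h1] at h2
      omega
    rw [insert_fresh_eq_counter xs t hnotin, sorted_counter_items_eq_runs_sorted,
      foldl_eq_runs]
  · rw [if_neg hm, if_neg hm, sorted_counter_items_eq_runs_sorted, foldl_eq_runs]
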